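-- pv_equiv track=rewrite | github.com/Irina220292/NLP_uni_course_works | hw06_word_similarity/cooccurrence.py | cooccurrences
-- ===== SOURCE A (Python) =====
-- from collections import defaultdict, Counter
--
-- def cooccurrences(tokens, n, vocab):
--     """
--     This takes a list of tokens (representing a text) and returns a dictionary mapping tuples of words
--     to their co-occurrence count in windows of n tokens (i.e. the maximum considered distance is n).
--     In other words, for each position in the corpus, co-occurrences with n tokens to the left and to the right are
--     counted. Only words in a given set of words (the vocabulary) are considered.
--     (Note: co-occurrence only holds between words in different positions, not for a position with itself.)
--
--     >>> cooccurrences(["a","rose","is","a","rose"], 2, {"rose", "a"}) == {('rose', 'a'): 3, ('a', 'rose'): 3}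
--     True
--     >>> cooccurrences(["a","rose","is","a","rose"], 1, {"rose", "is"}) == {('rose', 'is'): 1, ('is', 'rose'): 1}
--     True
--     """
--     pair_to_count = defaultdict(int)
--     for middle_position in range(len(tokens)):
--         middle_word = tokens[middle_position]
--         context_start = max(0, middle_position - n)
--         context_end = min(len(tokens), middle_position + n + 1)
--         for context_position in range(context_start, context_end):
--             if context_position != middle_position and middle_word in vocab and tokens[context_position] in vocab:
--                 pair_to_count[(middle_word, tokens[context_position])] += 1
--     return pair_to_count
-- ===== SOURCE B (Python) =====
-- def cooccurrences(tokens, n, vocab):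
--     """Two-pointer sliding window over the compressed list of vocabulary occurrences:
--     non-vocabulary tokens are skipped entirely and window bounds are advanced
--     monotonically instead of being rescanned per position."""
--     words = set(vocab)
--     occ = [(i, w) for i, w in enumerate(tokens) if w in words]
--     m = len(occ)
--     counts = {}
--     lo = 0
--     hi = 0
--     for a in range(m):
--         p, w = occ[a]
--         while lo < m and occ[lo][0] < p - n:
--             lo += 1
--         while hi < m and occ[hi][0] <= p + n:
--             hi += 1
--         for _, c in occ[lo:a] + occ[a + 1:hi]:
--             key = (w, c)
--             counts[key] = counts.get(key, 0) + 1
--     return counts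
-- ===== Notes on version B (the rewrite author's own statement) =====
-- stated objective: alternative
-- what changed: B first compresses the input to the list of vocabulary occurrences (position, word), then slides the window over that list with two monotone pointers, reading each context as two slices of the occurrence list, so non-vocabulary tokens are never rescanned and the per-context membership tests and per-position window recomputation of A disappear.
import Mathlib
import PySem

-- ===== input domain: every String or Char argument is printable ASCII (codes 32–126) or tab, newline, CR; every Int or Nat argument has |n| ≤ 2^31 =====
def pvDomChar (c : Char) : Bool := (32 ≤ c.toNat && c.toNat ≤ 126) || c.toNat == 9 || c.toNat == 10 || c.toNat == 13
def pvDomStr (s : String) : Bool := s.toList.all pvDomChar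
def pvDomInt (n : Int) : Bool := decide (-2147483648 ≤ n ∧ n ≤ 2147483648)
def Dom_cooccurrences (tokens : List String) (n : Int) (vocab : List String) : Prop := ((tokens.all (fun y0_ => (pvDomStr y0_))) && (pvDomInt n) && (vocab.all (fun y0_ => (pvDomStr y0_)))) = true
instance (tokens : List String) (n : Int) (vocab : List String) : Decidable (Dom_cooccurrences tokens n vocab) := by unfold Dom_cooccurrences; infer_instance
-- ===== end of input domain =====

-- B replaces A's per-position window rescan over ALL tokens by a two-pointer sliding
-- window over the compressed list of vocabulary occurrences (non-vocabulary tokens are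
-- skipped entirely; the window bounds advance monotonically). Return value only; neither
-- version mutates its arguments.

-- ===== PORT A =====
def cooccurrences (tokens : List String) (n : Int) (vocab : List String) : List (List String × Int) :=
  ((PySem.List.pyRange 0 (tokens.length : Int) 1).foldl (fun d i =>
      (PySem.List.pyRange (max 0 (i - n)) (min (tokens.length : Int) (i + n + 1)) 1).foldl
        (fun d j =>
          if j ≠ i ∧ PySem.List.pyGetD tokens i "" ∈ vocab ∧ PySem.List.pyGetD tokens j "" ∈ vocab then
            d.modify [PySem.List.pyGetD tokens i "", PySem.List.pyGetD tokens j ""] 0 (· + 1)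
          else d) d)
    PySem.Dict.empty).items

-- ===== PORT B =====
-- 'while k < len(occ) and pred(occ[k]): k += 1' (the two pointer-advance loops of Source B)
def pvAdvance (occ : List (Int × String)) (pred : Int × String → Bool) (k : Nat) : Nat :=
  if h : k < occ.length then
    if pred occ[k] then pvAdvance occ pred (k + 1) else k
  else k
termination_by occ.length - k

def cooccurrences_alt (tokens : List String) (n : Int) (vocab : List String) : List (List String × Int) :=
  let words := PySem.Set.ofList vocab
  let occ := (PySem.List.enumerate tokens 0).filter (fun e => PySem.Set.contains words e.2)
  let m := occ.length
  (((PySem.List.pyRange 0 (m : Int) 1).foldl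
      (fun (st : Nat × Nat × PySem.Dict (List String) Int) a =>
        let pw := PySem.List.pyGetD occ a (0, "")
        let lo := pvAdvance occ (fun e => decide (e.1 < pw.1 - n)) st.1
        let hi := pvAdvance occ (fun e => decide (e.1 ≤ pw.1 + n)) st.2.1
        let d := (PySem.List.slice occ (some (lo : Int)) (some a) ++
                  PySem.List.slice occ (some (a + 1)) (some (hi : Int))).foldl
                   (fun d e => d.modify [pw.2, e.2] 0 (· + 1)) st.2.2
        (lo, hi, d))
      (0, 0, PySem.Dict.empty)).2.2).items

-- ===== PRECONDITION & SPEC =====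
def Spec_cooccurrences (tokens : List String) (n : Int) (vocab : List String) (out : List (List String × Int)) : Prop := out = cooccurrences_alt tokens n vocab
instance (tokens : List String) (n : Int) (vocab : List String) (out : List (List String × Int)) : Decidable (Spec_cooccurrences tokens n vocab out) := by unfold Spec_cooccurrences; infer_instance

-- ===== CLAIM (what is proved, stated in full; the proofs are below) =====
def Claim_equal_cooccurrences : Prop := ∀ (tokens : List String) (n : Int) (vocab : List String), Dom_cooccurrences tokens n vocab → Spec_cooccurrences tokens n vocab (cooccurrences tokens n vocab)


-- ===== LEMMAS AND PROOFS =====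

-- the compressed list of vocabulary occurrences (port B's local 'occ')
def pvOcc (tokens : List String) (vocab : List String) : List (Int × String) :=
  (PySem.List.enumerate tokens 0).filter (fun e => PySem.Set.contains (PySem.Set.ofList vocab) e.2)

theorem pvOcc_eq_map (tokens vocab : List String) :
    pvOcc tokens vocab =
      ((PySem.List.pyRange 0 (tokens.length : Int) 1).filter
          (fun j => decide (PySem.List.pyGetD tokens j "" ∈ vocab))).map
        (fun j => (j, PySem.List.pyGetD tokens j "")) := by
  unfold pvOcc
  rw [PySem.List.enumerate_eq_map_pyRange (d := ""), List.filter_map]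
  congr 1
  apply List.filter_congr
  intro j _
  simp [Function.comp]

theorem pvOcc_pairwise (tokens vocab : List String) :
    (pvOcc tokens vocab).Pairwise (fun x y => x.1 < y.1) :=
  List.Pairwise.filter _ (PySem.List.pairwise_lt_enumerate tokens 0)

theorem pvOcc_mem (tokens vocab : List String) (e : Int × String) (he : e ∈ pvOcc tokens vocab) :
    0 ≤ e.1 ∧ e.1 < (tokens.length : Int) ∧ PySem.List.pyGetD tokens e.1 "" = e.2 ∧ e.2 ∈ vocab := by
  rw [pvOcc_eq_map] at he
  rcases List.mem_map.mp he with ⟨j, hj, rfl⟩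
  rcases List.mem_filter.mp hj with ⟨hjr, hjv⟩
  rw [PySem.List.mem_pyRange_one] at hjr
  exact ⟨hjr.1, hjr.2, rfl, by simpa using hjv⟩

-- a predicate that is downward closed along positions
def pvAnti (pred : Int × String → Bool) : Prop :=
  ∀ x y : Int × String, x.1 < y.1 → pred y = true → pred x = true

theorem pvAnti_lt (t : Int) : pvAnti (fun e => decide (e.1 < t)) := by
  intro x y h hy; simp at hy ⊢; omega

theorem pvAnti_le (t : Int) : pvAnti (fun e => decide (e.1 ≤ t)) := by
  intro x y h hy; simp at hy ⊢; omega

-- K1: on a strictly position-sorted list, an antitone predicate holds exactly on a prefix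
theorem pvCountP_prefix (occ : List (Int × String)) (pred : Int × String → Bool)
    (hs : occ.Pairwise (fun x y => x.1 < y.1)) (hp : pvAnti pred) :
    ∀ i (h : i < occ.length), (pred occ[i] = true ↔ i < occ.countP pred) := by
  induction occ with
  | nil => intro i h; simp at h
  | cons x t ih =>
    rcases List.pairwise_cons.mp hs with ⟨hxt, hts⟩
    intro i h
    by_cases hx : pred x = true
    · rw [List.countP_cons_of_pos hx]
      cases i with
      | zero => simpa using hx
      | succ i =>
        have hih := ih hts i (by simpa using h)
        simp only [List.getElem_cons_succ]
        rw [hih]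
        omega
    · have ht0 : t.countP pred = 0 := by
        apply List.countP_eq_zero.mpr
        intro y hy hyp
        exact hx (hp x y (hxt y hy) hyp)
      have hc : (x :: t).countP pred = 0 := by
        rw [List.countP_cons_of_neg (by simpa using hx)]; exact ht0
      rw [hc]
      cases i with
      | zero => simpa using hx
      | succ i =>
        simp only [List.getElem_cons_succ]
        constructor
        · intro hyp
          exact absurd (hp x _ (hxt _ (List.getElem_mem _)) hyp) hx
        · omega

-- K2: the while-loop advance lands exactly on the prefix length
theorem pvAdvance_eq (occ : List (Int × String)) (pred : Int × String → Bool)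
    (hs : occ.Pairwise (fun x y => x.1 < y.1)) (hp : pvAnti pred) :
    ∀ k s, occ.countP pred - s = k → s ≤ occ.countP pred →
      pvAdvance occ pred s = occ.countP pred := by
  intro k
  induction k with
  | zero =>
    intro s h0 hle
    have hse : occ.countP pred = s := by omega
    rw [pvAdvance]
    split
    · rename_i hlt
      have hnp : ¬ pred occ[s] = true := by
        intro hpt
        have := (pvCountP_prefix occ pred hs hp s hlt).mp hpt
        omega
      rw [if_neg hnp]
      omega
    · omega
  | succ k ih =>
    intro s h0 hle
    have hslt : s < occ.countP pred := by omega
    have hlen : s < occ.length := lt_of_lt_of_le hslt (List.countP_le_length)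
    have hpt : pred occ[s] = true := (pvCountP_prefix occ pred hs hp s hlen).mpr hslt
    rw [pvAdvance, dif_pos hlen, if_pos hpt]
    exact ih (s + 1) (by omega) (by omega)

-- K3a: the prefix on which an antitone predicate holds is its filter
theorem pvTake_countP (occ : List (Int × String)) (pred : Int × String → Bool)
    (hs : occ.Pairwise (fun x y => x.1 < y.1)) (hp : pvAnti pred) :
    occ.take (occ.countP pred) = occ.filter pred := by
  induction occ with
  | nil => simp
  | cons x t ih =>
    rcases List.pairwise_cons.mp hs with ⟨hxt, hts⟩
    by_cases hx : pred x = true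
    · rw [List.countP_cons_of_pos hx, List.take_succ_cons, List.filter_cons_of_pos hx, ih hts]
    · have ht0 : t.countP pred = 0 := List.countP_eq_zero.mpr
        (fun y hy hyp => hx (hp x y (hxt y hy) hyp))
      rw [List.countP_cons_of_neg (by simpa using hx), ht0,
          List.take_zero, List.filter_cons_of_neg (by simpa using hx)]
      symm
      exact List.filter_eq_nil_iff.mpr
        (fun y hy hyp => hx (hp x y (hxt y hy) hyp))

-- K3: a middle segment cut out by two antitone prefix counts is a band filter
theorem pvDrop_take_filter (occ : List (Int × String)) (p1 p2 : Int × String → Bool)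
    (hs : occ.Pairwise (fun x y => x.1 < y.1)) (h1 : pvAnti p1) (h2 : pvAnti p2)
    (h12 : ∀ e, p1 e = true → p2 e = true) :
    (occ.drop (occ.countP p1)).take (occ.countP p2 - occ.countP p1) =
      occ.filter (fun e => p2 e && !p1 e) := by
  induction occ with
  | nil => simp
  | cons x t ih =>
    rcases List.pairwise_cons.mp hs with ⟨hxt, hts⟩
    by_cases hx1 : p1 x = true
    · have hx2 : p2 x = true := h12 x hx1
      rw [List.countP_cons_of_pos hx1, List.countP_cons_of_pos hx2,
          List.drop_succ_cons, Nat.succ_sub_succ,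
          List.filter_cons_of_neg (by simp [hx1]), ih hts]
    · have ht1 : t.countP p1 = 0 := List.countP_eq_zero.mpr
        (fun y hy hyp => hx1 (h1 x y (hxt y hy) hyp))
      have hc1 : (x :: t).countP p1 = 0 := by
        rw [List.countP_cons_of_neg (by simpa using hx1)]; exact ht1
      by_cases hx2 : p2 x = true
      · rw [hc1, List.countP_cons_of_pos hx2, List.drop_zero, Nat.sub_zero,
            List.take_succ_cons, List.filter_cons_of_pos (by simp [hx1, hx2]),
            pvTake_countP t p2 hts h2]
        congr 1
        symm
        apply List.filter_congr
        intro y hy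
        have : p1 y = false := by
          rcases Bool.eq_false_or_eq_true (p1 y) with h | h
          · exact absurd (h1 x y (hxt y hy) h) hx1
          · exact h
        simp [this]
      · have hc2 : (x :: t).countP p2 = 0 := by
          rw [List.countP_cons_of_neg (by simpa using hx2)]
          exact List.countP_eq_zero.mpr (fun y hy hyp => hx2 (h2 x y (hxt y hy) hyp))
        rw [hc1, hc2]
        simp only [Nat.zero_sub, List.take_zero]
        symm
        apply List.filter_eq_nil_iff.mpr
        intro y hy
        rcases List.mem_cons.mp hy with rfl | hyt
        · simp [hx2]
        · have : p2 y = false := by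
            rcases Bool.eq_false_or_eq_true (p2 y) with h | h
            · exact absurd (h2 x y (hxt y hyt) h) hx2
            · exact h
          simp [this]

-- K4: counts of the strict/weak prefixes at the list's own a-th position
theorem pvCountP_lt_getD (occ : List (Int × String))
    (hs : occ.Pairwise (fun x y => x.1 < y.1)) :
    ∀ a, a < occ.length → occ.countP (fun e => decide (e.1 < (occ.getD a (0, "")).1)) = a := by
  induction occ with
  | nil => intro a h; simp at h
  | cons x t ih =>
    rcases List.pairwise_cons.mp hs with ⟨hxt, hts⟩
    intro a h
    cases a with
    | zero =>
      rw [List.getD_cons_zero, List.countP_cons_of_neg (by simp),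
          List.countP_eq_zero.mpr (fun y hy => by have := hxt y hy; simp; omega)]
    | succ a =>
      have ha : a < t.length := by simpa using h
      have hmem : t.getD a (0, "") ∈ t := by
        rw [List.getD_eq_getElem t _ ha]; exact List.getElem_mem ha
      rw [List.getD_cons_succ,
          List.countP_cons_of_pos (by simp only [decide_eq_true_eq]; exact hxt _ hmem),
          ih hts a ha]

theorem pvCountP_le_getD (occ : List (Int × String))
    (hs : occ.Pairwise (fun x y => x.1 < y.1)) :
    ∀ a, a < occ.length → occ.countP (fun e => decide (e.1 ≤ (occ.getD a (0, "")).1)) = a + 1 := by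
  induction occ with
  | nil => intro a h; simp at h
  | cons x t ih =>
    rcases List.pairwise_cons.mp hs with ⟨hxt, hts⟩
    intro a h
    cases a with
    | zero =>
      rw [List.getD_cons_zero, List.countP_cons_of_pos (by simp),
          List.countP_eq_zero.mpr (fun y hy => by have := hxt y hy; simp; omega)]
    | succ a =>
      have ha : a < t.length := by simpa using h
      have hmem : t.getD a (0, "") ∈ t := by
        rw [List.getD_eq_getElem t _ ha]; exact List.getElem_mem ha
      rw [List.getD_cons_succ,
          List.countP_cons_of_pos (by simp only [decide_eq_true_eq]; exact le_of_lt (hxt _ hmem)),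
          ih hts a ha]

-- R: a window filter over range(0, L) is the clamped subrange
theorem pvFilter_pyRange_window (L a b : Int) :
    (PySem.List.pyRange 0 L 1).filter (fun j => decide (a ≤ j ∧ j < b)) =
      PySem.List.pyRange (max 0 a) (min L b) 1 := by
  rcases le_or_gt (min L b) (max 0 a) with hle | hlt
  · rw [PySem.List.pyRange_one_eq_nil hle]
    apply List.filter_eq_nil_iff.mpr
    intro j hj
    rw [PySem.List.mem_pyRange_one] at hj
    simp only [decide_eq_true_eq]
    omega
  · have h1 : (0:Int) ≤ max 0 a := by omega
    have h2 : max 0 a ≤ min L b := le_of_lt hlt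
    have h3 : min L b ≤ L := by omega
    have e1 : (PySem.List.pyRange 0 (max 0 a) 1).filter (fun j => decide (a ≤ j ∧ j < b)) = [] := by
      apply List.filter_eq_nil_iff.mpr
      intro j hj
      rw [PySem.List.mem_pyRange_one] at hj
      simp only [decide_eq_true_eq]
      omega
    have e2 : (PySem.List.pyRange (max 0 a) (min L b) 1).filter (fun j => decide (a ≤ j ∧ j < b)) =
        PySem.List.pyRange (max 0 a) (min L b) 1 := by
      apply List.filter_eq_self.mpr
      intro j hj
      rw [PySem.List.mem_pyRange_one] at hj
      simp only [decide_eq_true_eq]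
      omega
    have e3 : (PySem.List.pyRange (min L b) L 1).filter (fun j => decide (a ≤ j ∧ j < b)) = [] := by
      apply List.filter_eq_nil_iff.mpr
      intro j hj
      rw [PySem.List.mem_pyRange_one] at hj
      simp only [decide_eq_true_eq]
      omega
    rw [PySem.List.pyRange_one_append 0 (max 0 a) L h1 (by omega),
        PySem.List.pyRange_one_append (max 0 a) (min L b) L h2 h3,
        List.filter_append, List.filter_append, e1, e2, e3]
    simp

-- H1: a list is the range of its own getD reads
theorem pvMap_range_getD (xs : List (Int × String)) :
    (List.range xs.length).map (fun a => xs.getD a (0, "")) = xs := by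
  apply List.ext_getElem
  · simp
  · intro i h1 h2
    simp [List.getD, List.getElem?_eq_getElem h2]

-- H2: a flatMap ignores elements on which the body is empty
theorem pvFlatMap_filter (l : List Int) (p : Int → Bool) (f : Int → List (List String))
    (h : ∀ x ∈ l, p x = false → f x = []) :
    l.flatMap f = (l.filter p).flatMap f := by
  induction l with
  | nil => simp
  | cons x t ih =>
    have ht := ih (fun y hy => h y (List.mem_cons_of_mem x hy))
    by_cases hx : p x = true
    · rw [List.flatMap_cons, List.filter_cons_of_pos hx, List.flatMap_cons, ht]
    · rw [List.flatMap_cons, List.filter_cons_of_neg (by simpa using hx),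
          h x (List.mem_cons_self) (by simpa using hx), List.nil_append, ht]

-- the closed forms of B's two pointers and per-position emitted keys
def pvLoAt (tokens : List String) (n : Int) (vocab : List String) (a : Nat) : Nat :=
  (pvOcc tokens vocab).countP
    (fun e => decide (e.1 < ((pvOcc tokens vocab).getD a (0, "")).1 - n))

def pvHiAt (tokens : List String) (n : Int) (vocab : List String) (a : Nat) : Nat :=
  (pvOcc tokens vocab).countP
    (fun e => decide (e.1 ≤ ((pvOcc tokens vocab).getD a (0, "")).1 + n))

def pvWin (tokens : List String) (n : Int) (vocab : List String) (a : Nat) : List (List String) :=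
  ((((pvOcc tokens vocab).drop (pvLoAt tokens n vocab a)).take (a - pvLoAt tokens n vocab a)) ++
    (((pvOcc tokens vocab).drop (a + 1)).take (pvHiAt tokens n vocab a - (a + 1)))).map
    (fun e => [((pvOcc tokens vocab).getD a (0, "")).2, e.2])

def pvLo (tokens : List String) (n : Int) (vocab : List String) (k : Nat) : Nat :=
  if k = 0 then 0 else pvLoAt tokens n vocab (k - 1)

def pvHi (tokens : List String) (n : Int) (vocab : List String) (k : Nat) : Nat :=
  if k = 0 then 0 else pvHiAt tokens n vocab (k - 1)

-- monotonicity of the two pointers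
theorem pvLo_le_LoAt (tokens : List String) (n : Int) (vocab : List String) (k : Nat)
    (hk : k < (pvOcc tokens vocab).length) :
    pvLo tokens n vocab k ≤ pvLoAt tokens n vocab k := by
  unfold pvLo
  split
  · exact Nat.zero_le _
  · rename_i hk0
    unfold pvLoAt
    apply List.countP_mono_left
    intro e _ hdec
    have hlt : ((pvOcc tokens vocab).getD (k - 1) (0, "")).1 <
        ((pvOcc tokens vocab).getD k (0, "")).1 := by
      rw [List.getD_eq_getElem _ _ (by omega), List.getD_eq_getElem _ _ hk]
      exact (List.pairwise_iff_getElem.mp (pvOcc_pairwise tokens vocab)) (k - 1) k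
        (by omega) hk (by omega)
    simp only [decide_eq_true_eq] at hdec ⊢
    omega

theorem pvHi_le_HiAt (tokens : List String) (n : Int) (vocab : List String) (k : Nat)
    (hk : k < (pvOcc tokens vocab).length) :
    pvHi tokens n vocab k ≤ pvHiAt tokens n vocab k := by
  unfold pvHi
  split
  · exact Nat.zero_le _
  · rename_i hk0
    unfold pvHiAt
    apply List.countP_mono_left
    intro e _ hdec
    have hlt : ((pvOcc tokens vocab).getD (k - 1) (0, "")).1 <
        ((pvOcc tokens vocab).getD k (0, "")).1 := by
      rw [List.getD_eq_getElem _ _ (by omega), List.getD_eq_getElem _ _ hk]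
      exact (List.pairwise_iff_getElem.mp (pvOcc_pairwise tokens vocab)) (k - 1) k
        (by omega) hk (by omega)
    simp only [decide_eq_true_eq] at hdec ⊢
    omega

-- F: closed form of B's outer fold
theorem pvFoldB (tokens : List String) (n : Int) (vocab : List String) :
    ∀ k, k ≤ (pvOcc tokens vocab).length →
      (PySem.List.pyRange 0 (k : Int) 1).foldl
        (fun (st : Nat × Nat × PySem.Dict (List String) Int) a =>
          let pw := PySem.List.pyGetD (pvOcc tokens vocab) a (0, "")
          let lo := pvAdvance (pvOcc tokens vocab) (fun e => decide (e.1 < pw.1 - n)) st.1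
          let hi := pvAdvance (pvOcc tokens vocab) (fun e => decide (e.1 ≤ pw.1 + n)) st.2.1
          let d := (PySem.List.slice (pvOcc tokens vocab) (some (lo : Int)) (some a) ++
                    PySem.List.slice (pvOcc tokens vocab) (some (a + 1)) (some (hi : Int))).foldl
                     (fun d e => d.modify [pw.2, e.2] 0 (· + 1)) st.2.2
          (lo, hi, d))
        (0, 0, PySem.Dict.empty) =
      (pvLo tokens n vocab k, pvHi tokens n vocab k,
        ((List.range k).flatMap (pvWin tokens n vocab)).foldl
          (fun d key => d.modify key 0 (· + 1)) PySem.Dict.empty) := by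
  intro k
  induction k with
  | zero =>
    intro _
    rw [PySem.List.pyRange_one_eq_nil (by simp)]
    simp [pvLo, pvHi]
  | succ k ih =>
    intro hk1
    have hk : k ≤ (pvOcc tokens vocab).length := by omega
    have hklt : k < (pvOcc tokens vocab).length := by omega
    have hcast : ((k + 1 : Nat) : Int) = (k : Int) + 1 := by push_cast; ring
    rw [hcast, PySem.List.pyRange_one_succ_right (by positivity : (0:Int) ≤ (k : Int)),
        List.foldl_append, ih hk, List.foldl_cons, List.foldl_nil]
    simp only [PySem.List.pyGetD_natCast]
    have hs := pvOcc_pairwise tokens vocab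
    have hloA : pvAdvance (pvOcc tokens vocab)
        (fun e => decide (e.1 < ((pvOcc tokens vocab).getD k (0, "")).1 - n))
        (pvLo tokens n vocab k) = pvLoAt tokens n vocab k := by
      have := pvAdvance_eq (pvOcc tokens vocab)
        (fun e => decide (e.1 < ((pvOcc tokens vocab).getD k (0, "")).1 - n))
        hs (pvAnti_lt _) _ (pvLo tokens n vocab k) rfl
        (by rw [show (pvOcc tokens vocab).countP
              (fun e => decide (e.1 < ((pvOcc tokens vocab).getD k (0, "")).1 - n)) =
              pvLoAt tokens n vocab k from rfl]
            exact pvLo_le_LoAt tokens n vocab k hklt)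
      rw [this]
      rfl
    have hhiA : pvAdvance (pvOcc tokens vocab)
        (fun e => decide (e.1 ≤ ((pvOcc tokens vocab).getD k (0, "")).1 + n))
        (pvHi tokens n vocab k) = pvHiAt tokens n vocab k := by
      have := pvAdvance_eq (pvOcc tokens vocab)
        (fun e => decide (e.1 ≤ ((pvOcc tokens vocab).getD k (0, "")).1 + n))
        hs (pvAnti_le _) _ (pvHi tokens n vocab k) rfl
        (by rw [show (pvOcc tokens vocab).countP
              (fun e => decide (e.1 ≤ ((pvOcc tokens vocab).getD k (0, "")).1 + n)) =
              pvHiAt tokens n vocab k from rfl]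
            exact pvHi_le_HiAt tokens n vocab k hklt)
      rw [this]
      rfl
    rw [hloA, hhiA, PySem.List.slice_natCast,
        show ((k : Int) + 1) = ((k + 1 : Nat) : Int) by push_cast; ring,
        PySem.List.slice_natCast,
        List.range_succ, List.flatMap_append, List.flatMap_cons, List.flatMap_nil,
        List.append_nil, List.foldl_append]
    simp only [Prod.mk.injEq]
    refine ⟨?_, ?_, ?_⟩
    · simp [pvLo]
    · simp [pvHi]
    · rw [show pvWin tokens n vocab k =
          (((pvOcc tokens vocab).drop (pvLoAt tokens n vocab k)).take (k - pvLoAt tokens n vocab k) ++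
            ((pvOcc tokens vocab).drop (k + 1)).take (pvHiAt tokens n vocab k - (k + 1))).map
            (fun e => [((pvOcc tokens vocab).getD k (0, "")).2, e.2]) from rfl,
          List.foldl_append, List.map_append, List.foldl_append,
          List.foldl_map, List.foldl_map]

-- M: per middle position, A's filtered window equals B's two slices
theorem pvPerMiddle (tokens : List String) (n : Int) (vocab : List String) (a : Nat)
    (ha : a < (pvOcc tokens vocab).length) :
    ((PySem.List.pyRange (max 0 (((pvOcc tokens vocab).getD a (0, "")).1 - n))
        (min (tokens.length : Int) (((pvOcc tokens vocab).getD a (0, "")).1 + n + 1)) 1).filter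
      (fun j => decide (j ≠ ((pvOcc tokens vocab).getD a (0, "")).1 ∧
        PySem.List.pyGetD tokens ((pvOcc tokens vocab).getD a (0, "")).1 "" ∈ vocab ∧
        PySem.List.pyGetD tokens j "" ∈ vocab))).map
      (fun j => [PySem.List.pyGetD tokens ((pvOcc tokens vocab).getD a (0, "")).1 "",
                 PySem.List.pyGetD tokens j ""]) =
    pvWin tokens n vocab a := by
  have hs := pvOcc_pairwise tokens vocab
  have hmem : (pvOcc tokens vocab).getD a (0, "") ∈ pvOcc tokens vocab := by
    rw [List.getD_eq_getElem _ _ ha]; exact List.getElem_mem ha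
  obtain ⟨hp0, hpL, hpt, hwv⟩ := pvOcc_mem tokens vocab _ hmem
  have hca : (pvOcc tokens vocab).countP
      (fun e => decide (e.1 < ((pvOcc tokens vocab).getD a (0, "")).1)) = a :=
    pvCountP_lt_getD _ hs a ha
  have hca1 : (pvOcc tokens vocab).countP
      (fun e => decide (e.1 ≤ ((pvOcc tokens vocab).getD a (0, "")).1)) = a + 1 :=
    pvCountP_le_getD _ hs a ha
  unfold pvWin pvLoAt pvHiAt
  rw [hpt]
  set p := ((pvOcc tokens vocab).getD a (0, "")).1 with hpdef
  set w := ((pvOcc tokens vocab).getD a (0, "")).2 with hwdef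
  rcases le_or_gt 0 n with hn | hn
  · -- n ≥ 0 : split A's window at the middle position and match both sides
    rw [PySem.List.pyRange_one_append (max 0 (p - n)) p (min (tokens.length : Int) (p + n + 1))
          (by omega) (by omega),
        PySem.List.pyRange_one_cons (by omega : p < min (tokens.length : Int) (p + n + 1)),
        List.filter_append, List.filter_cons]
    rw [if_neg (by simp)]
    have hfL : (PySem.List.pyRange (max 0 (p - n)) p 1).filter
        (fun j => decide (j ≠ p ∧ w ∈ vocab ∧ PySem.List.pyGetD tokens j "" ∈ vocab)) =
        (PySem.List.pyRange (max 0 (p - n)) p 1).filter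
          (fun j => decide (PySem.List.pyGetD tokens j "" ∈ vocab)) := by
      apply List.filter_congr
      intro j hj
      rw [PySem.List.mem_pyRange_one] at hj
      have : j ≠ p := by omega
      simp [this, hwv]
    have hfR : (PySem.List.pyRange (p + 1) (min (tokens.length : Int) (p + n + 1)) 1).filter
        (fun j => decide (j ≠ p ∧ w ∈ vocab ∧ PySem.List.pyGetD tokens j "" ∈ vocab)) =
        (PySem.List.pyRange (p + 1) (min (tokens.length : Int) (p + n + 1)) 1).filter
          (fun j => decide (PySem.List.pyGetD tokens j "" ∈ vocab)) := by
      apply List.filter_congr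
      intro j hj
      rw [PySem.List.mem_pyRange_one] at hj
      have : j ≠ p := by omega
      simp [this, hwv]
    rw [hfL, hfR]
    have key : ∀ (lo hi : Int) (p1 p2 : Int × String → Bool),
        pvAnti p1 → pvAnti p2 → (∀ e, p1 e = true → p2 e = true) →
        (∀ j : Int, (decide (PySem.List.pyGetD tokens j "" ∈ vocab) &&
            decide (lo ≤ j ∧ j < hi)) =
          ((p2 (j, PySem.List.pyGetD tokens j "") && !p1 (j, PySem.List.pyGetD tokens j "")) &&
            decide (PySem.List.pyGetD tokens j "" ∈ vocab))) →
        ((PySem.List.pyRange (max 0 lo) (min (tokens.length : Int) hi) 1).filter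
            (fun j => decide (PySem.List.pyGetD tokens j "" ∈ vocab))).map
            (fun j => [w, PySem.List.pyGetD tokens j ""]) =
          (((pvOcc tokens vocab).drop ((pvOcc tokens vocab).countP p1)).take
              ((pvOcc tokens vocab).countP p2 - (pvOcc tokens vocab).countP p1)).map
            (fun e => [w, e.2]) := by
      intro lo hi p1 p2 h1 h2 h12 hbool
      rw [pvDrop_take_filter _ p1 p2 hs h1 h2 h12]
      rw [show pvOcc tokens vocab =
            ((PySem.List.pyRange 0 (tokens.length : Int) 1).filter
                (fun j => decide (PySem.List.pyGetD tokens j "" ∈ vocab))).map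
              (fun j => (j, PySem.List.pyGetD tokens j "")) from pvOcc_eq_map tokens vocab,
          List.filter_map, List.map_map]
      rw [← pvFilter_pyRange_window (tokens.length : Int) lo hi, List.filter_filter]
      rw [List.filter_filter]
      rw [List.filter_congr (fun j _ => hbool j)]
      simp [Function.comp]
    rw [List.map_append, List.map_append]
    congr 1
    · -- left context
      rw [show (PySem.List.pyRange (max 0 (p - n)) p 1) =
            PySem.List.pyRange (max 0 (p - n)) (min (tokens.length : Int) p) 1 by
          rw [min_eq_right (by omega : p ≤ (tokens.length : Int))]]
      rw [← hca]
      exact key (p - n) p _ _ (pvAnti_lt _) (pvAnti_lt _)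
        (fun e he => by simp only [decide_eq_true_eq] at he ⊢; omega)
        (fun j => by
          by_cases hv : PySem.List.pyGetD tokens j "" ∈ vocab <;>
            by_cases h1 : j < p <;> by_cases h2 : j < p - n <;>
              simp [hv, h1, h2] <;> omega)
    · -- right context
      rw [show (PySem.List.pyRange (p + 1) (min (tokens.length : Int) (p + n + 1)) 1) =
            PySem.List.pyRange (max 0 (p + 1)) (min (tokens.length : Int) (p + n + 1)) 1 by
          rw [max_eq_right (by omega : (0:Int) ≤ p + 1)]]
      rw [← hca1]
      exact key (p + 1) (p + n + 1) _ _ (pvAnti_le _) (pvAnti_le _)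
        (fun e he => by simp only [decide_eq_true_eq] at he ⊢; omega)
        (fun j => by
          by_cases hv : PySem.List.pyGetD tokens j "" ∈ vocab <;>
            by_cases h1 : j ≤ p + n <;> by_cases h2 : j ≤ p <;>
              simp [hv, h1, h2] <;> omega)
  · -- n < 0 : both windows are empty
    rw [PySem.List.pyRange_one_eq_nil (by omega)]
    have hl : a ≤ (pvOcc tokens vocab).countP (fun e => decide (e.1 < p - n)) := by
      rw [← hca]
      apply List.countP_mono_left
      intro e _ he
      simp only [decide_eq_true_eq] at he ⊢
      omega
    have hr : (pvOcc tokens vocab).countP (fun e => decide (e.1 ≤ p + n)) ≤ a := by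
      rw [← hca]
      apply List.countP_mono_left
      intro e _ he
      simp only [decide_eq_true_eq] at he ⊢
      omega
    rw [Nat.sub_eq_zero_of_le hl, Nat.sub_eq_zero_of_le (by omega)]
    simp

-- ===== VERDICT (by name: the statement is the Claim_ definition above) =====
theorem cooccurrences_spec : Claim_equal_cooccurrences := by
  intro tokens n vocab _
  show cooccurrences tokens n vocab = cooccurrences_alt tokens n vocab
  have hocc : (PySem.List.enumerate tokens 0).filter
      (fun e => PySem.Set.contains (PySem.Set.ofList vocab) e.2) = pvOcc tokens vocab := rfl
  -- B's fold collapses to a Counter-style fold over its key stream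
  have hB : cooccurrences_alt tokens n vocab =
      (((List.range (pvOcc tokens vocab).length).flatMap (pvWin tokens n vocab)).foldl
        (fun d key => d.modify key 0 (· + 1)) PySem.Dict.empty).items := by
    simp only [cooccurrences_alt, hocc]
    rw [pvFoldB tokens n vocab (pvOcc tokens vocab).length (le_refl _)]
  rw [hB]
  -- A's nested fold is the same fold over A's key stream
  unfold cooccurrences
  have hA : ∀ (l : List Int) (d : PySem.Dict (List String) Int), l.foldl (fun d i =>
      (PySem.List.pyRange (max 0 (i - n)) (min (tokens.length : Int) (i + n + 1)) 1).foldl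
        (fun d j =>
          if j ≠ i ∧ PySem.List.pyGetD tokens i "" ∈ vocab ∧ PySem.List.pyGetD tokens j "" ∈ vocab then
            d.modify [PySem.List.pyGetD tokens i "", PySem.List.pyGetD tokens j ""] 0 (· + 1)
          else d) d) d
      = (l.flatMap (fun i =>
          ((PySem.List.pyRange (max 0 (i - n)) (min (tokens.length : Int) (i + n + 1)) 1).filter
            (fun j => decide (j ≠ i ∧ PySem.List.pyGetD tokens i "" ∈ vocab ∧
              PySem.List.pyGetD tokens j "" ∈ vocab))).map
            (fun j => [PySem.List.pyGetD tokens i "", PySem.List.pyGetD tokens j ""]))).foldl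
          (fun d k => d.modify k 0 (· + 1)) d := by
    intro l d
    rw [List.foldl_flatMap]
    apply PySem.List.foldl_congr_mem
    intro d i _
    rw [PySem.List.foldl_ite_eq_foldl_filter, List.foldl_map]
  rw [hA]
  congr 1
  -- the two key streams are equal
  rw [pvFlatMap_filter (PySem.List.pyRange 0 (tokens.length : Int) 1)
        (fun i => decide (PySem.List.pyGetD tokens i "" ∈ vocab)) _
        (fun i _ hi => by
          rw [List.map_eq_nil_iff]
          apply List.filter_eq_nil_iff.mpr
          intro j _
          simp only [decide_eq_true_eq]
          intro hcontr
          have hd := decide_eq_true hcontr.2.1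
          simp [hd] at hi)]
  have hoccmap := pvOcc_eq_map tokens vocab
  rw [show ((PySem.List.pyRange 0 (tokens.length : Int) 1).filter
        (fun i => decide (PySem.List.pyGetD tokens i "" ∈ vocab))) =
      ((pvOcc tokens vocab).map (fun e => e.1)) by rw [hoccmap, List.map_map]; exact Eq.symm (List.map_id' _)]
  rw [List.flatMap_map]
  rw [show pvOcc tokens vocab =
        (List.range (pvOcc tokens vocab).length).map (fun a => (pvOcc tokens vocab).getD a (0, ""))
      by rw [pvMap_range_getD], List.flatMap_map]
  rw [show (List.range ((List.range (pvOcc tokens vocab).length).map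
        (fun a => (pvOcc tokens vocab).getD a (0, ""))).length) =
      List.range (pvOcc tokens vocab).length by rw [List.length_map, List.length_range]]
  congr 1
  apply List.flatMap_congr
  intro a hamem
  have ha : a < (pvOcc tokens vocab).length := List.mem_range.mp hamem
  exact pvPerMiddle tokens n vocab a ha
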